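-- pv_equiv track=rewrite | github.com/Ravulapellianirudh/HIGH-END-TRAINING | MATCH EVEN AND ODDS IN TOW LISTS.py | rec
-- ===== SOURCE A (Python) =====
-- def rec(l,l1,a,i,s):
--     if i==len(l):
--         return a,s
--     def r(l1,n,j,m):
--         if j==len(l1):
--             return m
--         if l1[j]%2!=0:
--             m.append(n+l1[j])
--         return r(l1,n,j+1,m)
--     if l[i]%2==0:
--         a.extend(r(l1,l[i],0,[]))# MATCH EVENS OF LIST 1 WITH ODDS OF LIST 2
--         s.append(sum(r(l1,l[i],0,[])))#SUM OF EACH MATCHED LIST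
--     return rec(l,l1,a,i+1,s)
-- ===== SOURCE B (Python) =====
-- # B: iterative re-implementation; precomputes the odds of l1 once, then a single
-- # index loop over l with list comprehensions. Mutates a and s in place like A.
-- def rec(l, l1, a, i, s):
--     odds = [y for y in l1 if y % 2 != 0]
--     for j in range(i, len(l)):
--         x = l[j]
--         if x % 2 == 0:
--             matched = [x + y for y in odds]
--             a.extend(matched)
--             s.append(sum(matched))
--     return a, s
-- ===== Notes on version B (the rewrite author's own statement) =====
-- stated objective: simpler
-- what changed: Both recursions are replaced by a single iterative index loop: the odds of l1 are computed once up front, and each even element of l contributes one list comprehension that is extended onto a and whose sum is appended to s.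
import Mathlib
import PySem

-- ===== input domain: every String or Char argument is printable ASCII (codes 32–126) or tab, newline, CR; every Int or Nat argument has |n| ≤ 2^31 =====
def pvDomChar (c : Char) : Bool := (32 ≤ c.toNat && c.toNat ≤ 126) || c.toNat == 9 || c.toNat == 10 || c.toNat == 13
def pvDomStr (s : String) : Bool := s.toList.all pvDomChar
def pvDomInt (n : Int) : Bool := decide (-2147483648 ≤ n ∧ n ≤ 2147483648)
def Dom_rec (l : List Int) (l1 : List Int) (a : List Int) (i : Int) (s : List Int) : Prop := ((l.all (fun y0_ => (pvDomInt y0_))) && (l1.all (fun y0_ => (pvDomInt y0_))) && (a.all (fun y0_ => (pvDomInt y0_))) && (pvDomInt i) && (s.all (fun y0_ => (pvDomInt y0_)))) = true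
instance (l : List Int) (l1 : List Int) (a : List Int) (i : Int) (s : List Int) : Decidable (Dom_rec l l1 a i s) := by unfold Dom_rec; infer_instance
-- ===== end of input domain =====

-- B replaces A's two recursions by one iterative index loop over l with a precomputed
-- odds filter of l1; equivalence is about the RETURN value (both Pythons also mutate
-- a and s in place in the same way).


-- ===== PORT A =====
-- bounds of a successful Python index access (used by the ports' termination proofs)
theorem pyGet?_some_bounds {xs : List Int} {i : Int} {x : Int}
    (h : PySem.List.pyGet? xs i = some x) : -(xs.length : Int) ≤ i ∧ i < (xs.length : Int) := by
  have hne : PySem.List.pyGet? xs i ≠ none := by simp [h]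
  rw [Ne, PySem.List.pyGet?_eq_none_iff, not_not, PySem.Raise.InRange] at hne
  omega

-- inner helper r: walks l1 by index j, appending n + l1[j] for odd l1[j]
def rec_r (l1 : List Int) (n : Int) (j : Int) (m : List Int) : List Int :=
  if j = (l1.length : Int) then m
  else
    match h : PySem.List.pyGet? l1 j with
    | none => m   -- IndexError (never reached from j = 0)
    | some y =>
        rec_r l1 n (j + 1) (if PySem.Int.mod y 2 ≠ 0 then m ++ [n + y] else m)
termination_by ((l1.length : Int) - j).toNat
decreasing_by
  have := pyGet?_some_bounds h
  omega

def rec (l : List Int) (l1 : List Int) (a : List Int) (i : Int) (s : List Int) : List Int × List Int :=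
  if i = (l.length : Int) then (a, s)
  else
    match h : PySem.List.pyGet? l i with
    | none => (a, s)   -- IndexError (outside Pre_rec)
    | some x =>
        if PySem.Int.mod x 2 = 0 then
          rec l l1 (a ++ rec_r l1 x 0 []) (i + 1) (s ++ [(rec_r l1 x 0 []).sum])
        else
          rec l l1 a (i + 1) s
termination_by ((l.length : Int) - i).toNat
decreasing_by
  all_goals
    have := pyGet?_some_bounds h
    omega

-- ===== PORT B =====
def rec_alt (l : List Int) (l1 : List Int) (a : List Int) (i : Int) (s : List Int) : List Int × List Int :=
  let odds := l1.filter (fun y => PySem.Int.mod y 2 ≠ 0)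
  (PySem.List.pyRange i (l.length : Int) 1).foldl
    (fun (st : List Int × List Int) j =>
      match PySem.List.pyGet? l j with
      | none => st   -- IndexError (outside Pre_rec)
      | some x =>
          if PySem.Int.mod x 2 = 0 then
            let matched := odds.map (fun y => x + y)
            (st.1 ++ matched, st.2 ++ [matched.sum])
          else st)
    (a, s)

-- ===== PRECONDITION & SPEC =====
-- exactly the inputs on which the Python A returns: i may wrap negatively, but i > len(l) raises IndexError
def Pre_rec (l : List Int) (l1 : List Int) (a : List Int) (i : Int) (s : List Int) : Prop :=
  -(l.length : Int) ≤ i ∧ i ≤ (l.length : Int)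
instance (l : List Int) (l1 : List Int) (a : List Int) (i : Int) (s : List Int) : Decidable (Pre_rec l l1 a i s) := by unfold Pre_rec; infer_instance
def pvWitness_rec : List Int × List Int × List Int × Int × List Int := ([2, 3, 4], [1, 2, 5], [], 0, [])

def Spec_rec (l : List Int) (l1 : List Int) (a : List Int) (i : Int) (s : List Int) (out : List Int × List Int) : Prop := out = rec_alt l l1 a i s
instance (l : List Int) (l1 : List Int) (a : List Int) (i : Int) (s : List Int) (out : List Int × List Int) : Decidable (Spec_rec l l1 a i s out) := by unfold Spec_rec; infer_instance

-- ===== CLAIM (what is proved, stated in full; the proofs are below) =====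
def Claim_equal_rec : Prop := ∀ (l : List Int) (l1 : List Int) (a : List Int) (i : Int) (s : List Int), Dom_rec l l1 a i s → Pre_rec l l1 a i s → Spec_rec l l1 a i s (rec l l1 a i s)

-- ===== LEMMAS AND PROOFS =====

-- A's inner recursion r computes the odds filter-map (B's matched list).
theorem rec_r_eq (l1 : List Int) (n : Int) :
    ∀ (k : Nat) (j : Nat) (m : List Int), l1.length - j = k →
      rec_r l1 n (j : Int) m =
        m ++ ((l1.drop j).filter (fun y => PySem.Int.mod y 2 ≠ 0)).map (fun y => n + y) := by
  intro k
  induction k with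
  | zero =>
      intro j m hj
      have hle : l1.length ≤ j := by omega
      rw [rec_r]
      by_cases hj' : (j : Int) = (l1.length : Int)
      · simp [hj', List.drop_eq_nil_of_le hle]
      · rw [if_neg hj']
        split
        · simp [List.drop_eq_nil_of_le hle]
        · next y h => exact absurd (pyGet?_some_bounds h).2 (by push_cast; omega)
  | succ k ih =>
      intro j m hj
      have hjlt : j < l1.length := by omega
      have hne : ((j : Int) ≠ (l1.length : Int)) := by exact_mod_cast Nat.ne_of_lt hjlt
      rw [rec_r, if_neg hne]
      split
      · next h =>
          rw [PySem.List.pyGet?_ofNat (h := hjlt)] at h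
          exact absurd h (by simp)
      · next y h =>
          rw [PySem.List.pyGet?_ofNat (h := hjlt)] at h
          obtain rfl : l1[j] = y := by injection h
          have hcast : ((j : Int) + 1) = ((j + 1 : Nat) : Int) := by omega
          rw [hcast, ih (j + 1) _ (by omega)]
          rw [List.drop_eq_getElem_cons hjlt]
          have hm : PySem.Int.mod l1[j] 2 = l1[j] % 2 :=
            PySem.Int.mod_eq_emod_of_pos (by norm_num)
          by_cases hodd : PySem.Int.mod l1[j] 2 ≠ 0
          · have h1 : l1[j] % 2 = 1 := by omega
            rw [if_pos hodd, List.filter_cons]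
            simp [h1, List.append_assoc]
          · have h1 : l1[j] % 2 ≠ 1 := by omega
            rw [if_neg hodd, List.filter_cons]
            simp [h1]

-- The main loop: A's recursion from index i equals B's fold over range(i, len l).
theorem rec_loop_eq (l l1 : List Int) :
    ∀ (k : Nat) (i : Int) (a s : List Int), ((l.length : Int) - i).toNat = k →
      -(l.length : Int) ≤ i → i ≤ (l.length : Int) →
      rec l l1 a i s = rec_alt l l1 a i s := by
  intro k
  induction k with
  | zero =>
      intro i a s hk h1 h2
      have hi : i = (l.length : Int) := by omega
      rw [rec, rec_alt]
      simp [hi, PySem.List.pyRange_one_eq_nil (le_refl _)]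
  | succ k ih =>
      intro i a s hk h1 h2
      have hilt : i < (l.length : Int) := by omega
      have hne : i ≠ (l.length : Int) := by omega
      have hmatched : ∀ x : Int,
          rec_r l1 x 0 [] =
            (l1.filter (fun y => PySem.Int.mod y 2 ≠ 0)).map (fun y => x + y) := by
        intro x
        have := rec_r_eq l1 x l1.length 0 [] (by omega)
        simpa using this
      rw [rec, if_neg hne]
      split
      · next h =>
          rw [PySem.List.pyGet?_eq_none_iff, PySem.Raise.InRange] at h
          exact absurd h (by omega)
      · next x h =>
          rw [rec_alt, PySem.List.pyRange_one_cons hilt]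
          simp only [List.foldl_cons, h]
          by_cases hev : PySem.Int.mod x 2 = 0
          · rw [if_pos hev,
              ih (i + 1) (a ++ rec_r l1 x 0 []) (s ++ [(rec_r l1 x 0 []).sum]) (by omega) (by omega) (by omega),
              rec_alt]
            simp only [if_pos hev, hmatched]
          · rw [if_neg hev, ih (i + 1) a s (by omega) (by omega) (by omega), rec_alt]
            simp only [if_neg hev]

-- ===== VERDICT (by name: the statement is the Claim_ definition above) =====
theorem rec_spec : Claim_equal_rec := by
  intro l l1 a i s _ hpre
  unfold Spec_rec
  exact rec_loop_eq l l1 ((l.length : Int) - i).toNat i a s rfl hpre.1 hpre.2
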